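-- pv_equiv track=rewrite | github.com/ElBuitre25/finite-automata-lexical-analyzer | main.py | automata1
-- ===== SOURCE A (Python) =====
-- def automata1(string):
--
--     # states 9 10 11
--     current_state = 9
--
--
--     for character in string:
--
--         #focusing on caching with match the refusal cases,otherwise states proceed
--         match current_state:
--             case 9 if not character.isalpha():
--                 return False
--             case 10 if character.isalnum():
--                 current_state = current_state
--             case 11:
--                 return False
--             case _:
--                 current_state+=1
--
--     if current_state == 11:
--         return True
--     else:
--         return False
-- ===== SOURCE B (Python) =====
-- def automata1(string):
--     # positional checks: first char alpha, middle chars alnum, last char non-alnum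
--     if len(string) < 2:
--         return False
--     if not string[0].isalpha():
--         return False
--     for c in string[1:-1]:
--         if not c.isalnum():
--             return False
--     return not string[-1].isalnum()
-- ===== Notes on version B (the rewrite author's own statement) =====
-- stated objective: simpler
-- what changed: Replaces A's integer state machine (current_state 9/10/11 with a match inside the loop) by explicit positional checks: length >= 2, first char isalpha, every middle char isalnum, last char not isalnum.
import Mathlib
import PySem

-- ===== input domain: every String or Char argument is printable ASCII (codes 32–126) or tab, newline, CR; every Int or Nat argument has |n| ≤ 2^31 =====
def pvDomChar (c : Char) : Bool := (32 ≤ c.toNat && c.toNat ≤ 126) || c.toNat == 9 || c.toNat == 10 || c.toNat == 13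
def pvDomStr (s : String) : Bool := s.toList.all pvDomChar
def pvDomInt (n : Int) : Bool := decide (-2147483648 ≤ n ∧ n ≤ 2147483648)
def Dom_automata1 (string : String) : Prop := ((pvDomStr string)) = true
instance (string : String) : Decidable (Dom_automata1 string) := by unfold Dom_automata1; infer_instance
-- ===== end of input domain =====

-- B replaces A's integer state machine by explicit first/middle/last positional checks (objective: simpler).

-- ===== PORT A =====
-- the 'for character in string' loop with its early returns; state is the Python int current_state
def automata1Loop (cs : List Char) (st : Int) : Bool :=
  match cs with
  | [] => st == 11
  | c :: rest =>
    if st == 9 && !PySem.Chars.isalpha c then false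
    else if st == 10 && PySem.Chars.isalnum c then automata1Loop rest st
    else if st == 11 then false
    else automata1Loop rest (st + 1)

def automata1 (string : String) : Bool := automata1Loop string.toList 9

-- ===== PORT B =====
-- positional checks on the char list (string[0], string[1:-1], string[-1])
def automata1AltList (cs : List Char) : Bool :=
  if cs.length < 2 then false
  else if !PySem.Chars.isalpha (PySem.List.pyGetD cs 0 ' ') then false
  else if !(PySem.List.slice cs (some 1) (some (-1))).all PySem.Chars.isalnum then false
  else !PySem.Chars.isalnum (PySem.List.pyGetD cs (-1) ' ')

def automata1_alt (string : String) : Bool := automata1AltList string.toList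

-- ===== PRECONDITION & SPEC =====
def Spec_automata1 (string : String) (out : Bool) : Prop := out = automata1_alt string
instance (string : String) (out : Bool) : Decidable (Spec_automata1 string out) := by unfold Spec_automata1; infer_instance

-- ===== CLAIM (what is proved, stated in full; the proofs are below) =====
def Claim_equal_automata1 : Prop := ∀ (string : String), Dom_automata1 string → Spec_automata1 string (automata1 string)

-- ===== LEMMAS AND PROOFS =====

lemma loop11 (cs : List Char) : automata1Loop cs 11 = cs.isEmpty := by
  cases cs <;> simp [automata1Loop]

lemma step10 (c : Char) (cs : List Char) :
    automata1Loop (c :: cs) 10 =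
      if PySem.Chars.isalnum c then automata1Loop cs 10 else cs.isEmpty := by
  by_cases h : PySem.Chars.isalnum c = true <;> simp [automata1Loop, loop11, h]

lemma loop10 (cs : List Char) :
    automata1Loop cs 10 =
      (!cs.isEmpty && cs.dropLast.all PySem.Chars.isalnum
        && !PySem.Chars.isalnum (cs.getLastD ' ')) := by
  induction cs with
  | nil => simp [automata1Loop]
  | cons c rest ih =>
    rw [step10]
    cases rest with
    | nil => by_cases h : PySem.Chars.isalnum c = true <;> simp [automata1Loop, h]
    | cons r rs => by_cases h : PySem.Chars.isalnum c = true <;> simp [h, ih]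

lemma slice_one_neg_one (c : Char) (rest : List Char) :
    PySem.List.slice (c :: rest) (some 1) (some (-1)) = rest.dropLast := by
  cases rest with
  | nil => simp [PySem.List.slice]
  | cons r rs =>
    have h : ¬(((rs.length : Int) + 1) < 0) := by omega
    simp [PySem.List.slice, PySem.List.clampIdx, List.dropLast_eq_take, h]

lemma step9 (c : Char) (cs : List Char) :
    automata1Loop (c :: cs) 9 =
      if PySem.Chars.isalpha c then automata1Loop cs 10 else false := by
  by_cases h : PySem.Chars.isalpha c = true <;> simp [automata1Loop, h]

lemma list_equal (cs : List Char) : automata1Loop cs 9 = automata1AltList cs := by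
  cases cs with
  | nil => simp [automata1Loop, automata1AltList]
  | cons c rest =>
    rw [step9]
    by_cases hα : PySem.Chars.isalpha c = true
    · cases rest with
      | nil =>
        simp [automata1AltList, hα, loop10]
      | cons r rs =>
        simp [automata1AltList, hα, loop10, slice_one_neg_one]
        rw [PySem.List.pyGetD_neg_one (xs := c :: r :: rs) (h := by simp),
          List.getLast_cons (by simp)]
        rw [show (r :: rs).getLast (by simp) = (r :: rs).getLast?.getD ' ' by
          rw [List.getLast?_eq_some_getLast (by simp)]; rfl]
        rw [Bool.eq_iff_iff]
        simp [List.all_eq_true]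
    · simp [automata1AltList, hα]

-- ===== VERDICT (by name: the statement is the Claim_ definition above) =====
theorem automata1_spec : Claim_equal_automata1 := by
  intro s _
  unfold Spec_automata1 automata1 automata1_alt
  exact list_equal s.toList
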